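-- pv_equiv track=rewrite | github.com/EliahKagan/old-practice-snapshot | main/the-birthday-bar/the-birthday-bar3.py | count_window_sums
-- ===== SOURCE A (Python) =====
-- def count_window_sums(values, window_width, target_sum):
--     length = len(values)
--     if length < window_width:
--         return 0
--
--     acc = sum(values[i] for i in range(window_width))
--     count = 1 if acc == target_sum else 0
--
--     for j in range(window_width, length):
--         acc += values[j] - values[j - window_width]
--         if acc == target_sum:
--             count += 1
--
--     return count
-- ===== SOURCE B (Python) =====
-- def count_window_sums(values, window_width, target_sum):
--     prefix = [0]
--     total = 0
--     for v in values:
--         total += v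
--         prefix.append(total)
--     count = 0
--     for i in range(len(values) - window_width + 1):
--         if prefix[i + window_width] - prefix[i] == target_sum:
--             count += 1
--     return count
-- ===== Notes on version B (the rewrite author's own statement) =====
-- stated objective: alternative
-- what changed: Replaces the incrementally-updated sliding-window accumulator with a precomputed prefix-sum table and a single counting scan over window start indices.
import Mathlib
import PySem

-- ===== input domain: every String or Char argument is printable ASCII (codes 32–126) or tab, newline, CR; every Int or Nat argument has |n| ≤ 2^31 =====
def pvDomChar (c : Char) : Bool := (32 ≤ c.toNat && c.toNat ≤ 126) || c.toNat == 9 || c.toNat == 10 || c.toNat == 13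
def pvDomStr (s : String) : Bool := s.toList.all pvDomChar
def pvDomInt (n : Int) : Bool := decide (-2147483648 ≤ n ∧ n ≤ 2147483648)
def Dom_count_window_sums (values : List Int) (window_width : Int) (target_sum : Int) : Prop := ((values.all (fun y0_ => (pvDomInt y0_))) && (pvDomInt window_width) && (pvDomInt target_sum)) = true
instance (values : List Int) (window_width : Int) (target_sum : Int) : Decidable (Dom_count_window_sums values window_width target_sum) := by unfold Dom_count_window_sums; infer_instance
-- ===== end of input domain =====

-- B replaces A's incrementally-updated sliding-window accumulator with a precomputed
-- prefix-sum table and a single counting scan (alternative decomposition, same cost).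


-- ===== PORT A =====
def count_window_sums (values : List Int) (window_width : Int) (target_sum : Int) : Int :=
  let length : Int := values.length
  if length < window_width then 0
  else
    let acc : Int := (PySem.List.pyRange 0 window_width 1).foldl
      (fun a i => a + PySem.List.pyGetD values i 0) 0
    let count : Int := if acc = target_sum then 1 else 0
    let res := (PySem.List.pyRange window_width length 1).foldl
      (fun (st : Int × Int) j =>
        let acc := st.1 + PySem.List.pyGetD values j 0 - PySem.List.pyGetD values (j - window_width) 0
        (acc, if acc = target_sum then st.2 + 1 else st.2))
      (acc, count)
    res.2

-- ===== PORT B =====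
def count_window_sums_alt (values : List Int) (window_width : Int) (target_sum : Int) : Int :=
  let st := values.foldl
    (fun (st : Int × List Int) v => (st.1 + v, st.2 ++ [st.1 + v])) (0, [0])
  let pre := st.2
  (PySem.List.pyRange 0 ((values.length : Int) - window_width + 1) 1).foldl
    (fun c i =>
      if PySem.List.pyGetD pre (i + window_width) 0 - PySem.List.pyGetD pre i 0 = target_sum
      then c + 1 else c) 0

-- ===== PRECONDITION & SPEC =====
-- A raises IndexError on every input with window_width < 0 (its j/j-window_width index
-- arithmetic runs off the list); Pre_ excludes exactly those inputs.
def Pre_count_window_sums (values : List Int) (window_width : Int) (target_sum : Int) : Prop :=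
  0 ≤ window_width
instance (values : List Int) (window_width : Int) (target_sum : Int) : Decidable (Pre_count_window_sums values window_width target_sum) := by unfold Pre_count_window_sums; infer_instance
def pvWitness_count_window_sums : List Int × Int × Int := ([1, 2, 1, 2], 2, 3)

def Spec_count_window_sums (values : List Int) (window_width : Int) (target_sum : Int) (out : Int) : Prop := out = count_window_sums_alt values window_width target_sum
instance (values : List Int) (window_width : Int) (target_sum : Int) (out : Int) : Decidable (Spec_count_window_sums values window_width target_sum out) := by unfold Spec_count_window_sums; infer_instance

-- ===== CLAIM (what is proved, stated in full; the proofs are below) =====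
def Claim_equal_count_window_sums : Prop := ∀ (values : List Int) (window_width : Int) (target_sum : Int), Dom_count_window_sums values window_width target_sum → Pre_count_window_sums values window_width target_sum → Spec_count_window_sums values window_width target_sum (count_window_sums values window_width target_sum)

-- ===== LEMMAS AND PROOFS =====

-- prefix sum of the first k elements
def pvS (vs : List Int) (k : Nat) : Int := (vs.take k).sum

-- reference count: windows starting at 0..n-1 whose sum is ts
def pvCnt (vs : List Int) (w : Nat) (ts : Int) (n : Nat) : Int :=
  (List.range n).foldl (fun c k => if pvS vs (k + w) - pvS vs k = ts then c + 1 else c) 0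

theorem pvCnt_succ (vs : List Int) (w : Nat) (ts : Int) (n : Nat) :
    pvCnt vs w ts (n + 1) =
      if pvS vs (n + w) - pvS vs n = ts then pvCnt vs w ts n + 1 else pvCnt vs w ts n := by
  simp [pvCnt, List.range_succ]

theorem pvS_succ (vs : List Int) (k : Nat) (hk : k < vs.length) :
    pvS vs (k + 1) = pvS vs k + vs.getD k 0 := by
  unfold pvS
  rw [List.take_add_one, List.sum_append, List.getElem?_eq_getElem hk]
  simp [List.getD_eq_getElem?_getD, List.getElem?_eq_getElem hk]

-- characterisation of B's prefix-building fold
theorem pvPrefix_fold (vs : List Int) (t : Int) (p : List Int) :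
    vs.foldl (fun (st : Int × List Int) v => (st.1 + v, st.2 ++ [st.1 + v])) (t, p) =
      (t + vs.sum, p ++ (List.range vs.length).map (fun k => t + (vs.take (k + 1)).sum)) := by
  induction vs generalizing t p with
  | nil => simp
  | cons v vs ih =>
    simp only [List.foldl_cons, ih, List.length_cons, List.range_succ_eq_map,
      List.map_cons, List.map_map, List.take_succ_cons, List.sum_cons, Prod.mk.injEq]
    refine ⟨by ring, ?_⟩
    have hf : ((fun k => t + (v + (List.take k vs).sum)) ∘ Nat.succ) =
        fun k => t + v + (List.take (k + 1) vs).sum := by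
      funext k; simp [Function.comp]; ring
    rw [hf]
    simp [List.append_assoc]

theorem pvPrefix_getD (vs : List Int) (k : Nat) (hk : k ≤ vs.length) :
    PySem.List.pyGetD
      ((vs.foldl (fun (st : Int × List Int) v => (st.1 + v, st.2 ++ [st.1 + v])) (0, [0])).2)
      (k : Int) 0 = pvS vs k := by
  rw [pvPrefix_fold]
  simp only [PySem.List.pyGetD_natCast, List.singleton_append]
  cases k with
  | zero => simp [pvS]
  | succ k =>
    have hk' : k < vs.length := by omega
    rw [List.getD_eq_getElem?_getD]
    rw [show ((0 : Int) :: (List.range vs.length).map fun k => 0 + (vs.take (k + 1)).sum)[k + 1]?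
        = ((List.range vs.length).map fun k => 0 + (vs.take (k + 1)).sum)[k]? from rfl]
    simp [List.getElem?_map, List.getElem?_range hk', pvS]

-- A's initial accumulator is the first window's sum
theorem pvInit_fold (vs : List Int) (n : Nat) (hn : n ≤ vs.length) :
    ((List.range n).map (fun k : Nat => ((0 : Int) + (k : Int)))).foldl
      (fun a i => a + PySem.List.pyGetD vs i 0) 0 = pvS vs n := by
  induction n with
  | zero => simp [pvS]
  | succ n ih =>
    rw [List.range_succ, List.map_append, List.foldl_append, ih (by omega)]
    simp only [List.map_cons, List.map_nil, List.foldl_cons, List.foldl_nil]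
    rw [show ((0 : Int) + (n : Int)) = ((n : Nat) : Int) from by ring,
      PySem.List.pyGetD_natCast vs n 0, pvS_succ vs n (by omega)]

-- A's main loop invariant
theorem pvA_loop (vs : List Int) (w : Nat) (ts : Int) (hw : w ≤ vs.length) (n : Nat)
    (hn : n ≤ vs.length - w) :
    ((List.range n).map (fun k : Nat => ((w : Int) + (k : Int)))).foldl
      (fun (st : Int × Int) j =>
        let acc := st.1 + PySem.List.pyGetD vs j 0 - PySem.List.pyGetD vs (j - (w : Int)) 0
        (acc, if acc = ts then st.2 + 1 else st.2))
      (pvS vs w, if pvS vs w = ts then 1 else 0) =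
      (pvS vs (n + w) - pvS vs n, pvCnt vs w ts (n + 1)) := by
  induction n with
  | zero =>
    simp [pvCnt, pvS]
  | succ n ih =>
    rw [List.range_succ, List.map_append, List.foldl_append, ih (by omega)]
    simp only [List.map_cons, List.map_nil, List.foldl_cons, List.foldl_nil]
    have h1 : PySem.List.pyGetD vs ((w : Int) + (n : Int)) 0 = vs.getD (w + n) 0 := by
      rw [show ((w : Int) + (n : Int)) = ((w + n : Nat) : Int) from by push_cast; ring]
      exact PySem.List.pyGetD_natCast vs (w + n) 0
    have h2 : PySem.List.pyGetD vs ((w : Int) + (n : Int) - (w : Int)) 0 = vs.getD n 0 := by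
      rw [show ((w : Int) + (n : Int) - (w : Int)) = ((n : Nat) : Int) from by ring]
      exact PySem.List.pyGetD_natCast vs n 0
    have hacc : pvS vs (n + w) - pvS vs n + vs.getD (w + n) 0 - vs.getD n 0 =
        pvS vs (n + 1 + w) - pvS vs (n + 1) := by
      rw [show n + 1 + w = (n + w) + 1 from by ring, pvS_succ vs (n + w) (by omega),
        pvS_succ vs n (by omega), show w + n = n + w from by ring]
      ring
    simp only [h1, h2, hacc, Prod.mk.injEq]
    exact ⟨trivial, by rw [pvCnt_succ vs w ts (n + 1)]⟩

-- B's counting fold equals pvCnt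
theorem pvB_count (vs : List Int) (w : Nat) (ts : Int) (n : Nat) (hn : n + w ≤ vs.length + 1) :
    ((List.range n).map (fun k : Nat => ((0 : Int) + (k : Int)))).foldl
      (fun c i =>
        if PySem.List.pyGetD
             ((vs.foldl (fun (st : Int × List Int) v => (st.1 + v, st.2 ++ [st.1 + v])) (0, [0])).2)
             (i + (w : Int)) 0 -
           PySem.List.pyGetD
             ((vs.foldl (fun (st : Int × List Int) v => (st.1 + v, st.2 ++ [st.1 + v])) (0, [0])).2)
             i 0 = ts
        then c + 1 else c) 0 = pvCnt vs w ts n := by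
  induction n with
  | zero => simp [pvCnt]
  | succ n ih =>
    rw [List.range_succ, List.map_append, List.foldl_append, ih (by omega)]
    simp only [List.map_cons, List.map_nil, List.foldl_cons, List.foldl_nil]
    rw [show ((0 : Int) + (n : Int) + (w : Int)) = ((n + w : Nat) : Int) from by push_cast; ring,
      show ((0 : Int) + (n : Int)) = ((n : Nat) : Int) from by ring,
      pvPrefix_getD vs (n + w) (by omega), pvPrefix_getD vs n (by omega),
      pvCnt_succ vs w ts n]

-- ===== VERDICT (by name: the statement is the Claim_ definition above) =====
theorem count_window_sums_spec : Claim_equal_count_window_sums := by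
  intro values ww ts _ hpre
  unfold Pre_count_window_sums at hpre
  show count_window_sums values ww ts = count_window_sums_alt values ww ts
  set w : Nat := ww.toNat with hw
  have hww : ww = (w : Int) := by omega
  rw [hww]
  by_cases hcase : (values.length : Int) < (w : Int)
  · have hA : count_window_sums values (w : Int) ts = 0 := by
      simp only [count_window_sums]
      rw [if_pos hcase]
    have hB : count_window_sums_alt values (w : Int) ts = 0 := by
      simp only [count_window_sums_alt]
      rw [PySem.List.pyRange_one,
        show ((values.length : Int) - (w : Int) + 1 - 0).toNat = 0 from by omega]
      simp
    rw [hA, hB]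
  · have hwl : w ≤ values.length := by omega
    have hB : count_window_sums_alt values (w : Int) ts =
        pvCnt values w ts (values.length - w + 1) := by
      simp only [count_window_sums_alt]
      rw [PySem.List.pyRange_one,
        show ((values.length : Int) - (w : Int) + 1 - 0).toNat = values.length - w + 1 from by omega]
      exact pvB_count values w ts (values.length - w + 1) (by omega)
    have hA : count_window_sums values (w : Int) ts =
        pvCnt values w ts (values.length - w + 1) := by
      simp only [count_window_sums]
      rw [if_neg hcase, PySem.List.pyRange_one 0 ((w : Nat) : Int),
        show (((w : Nat) : Int) - 0).toNat = w from by omega,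
        pvInit_fold values w hwl, PySem.List.pyRange_one,
        show (((values.length : Nat) : Int) - ((w : Nat) : Int)).toNat = values.length - w from
          by omega,
        pvA_loop values w ts hwl (values.length - w) (le_refl _)]
    rw [hA, hB]
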